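-- pv_equiv track=rewrite | github.com/antonmalko/EyePy | readInput.py | fixation_data
-- ===== SOURCE A (Python) =====
-- def fixation_data(tagged_table):
-- # don't forget to turn these into ints
--     for tagged_line in tagged_table:
--         tag, line = tagged_line
--         Xes = map(int, line[8::4])
--         Ys = map(int, line[9::4])
--         fixation_starts = map(int, line[10::4])
--         fixation_ends = map(int, line[11::4])
--         fixations = ((x, y, end - start)
--             for x, y, start, end
--             in zip(Xes, Ys, fixation_starts, fixation_ends))
--         yield (tag, tuple(fixations))
-- ===== SOURCE B (Python) =====
-- def fixation_data(tagged_table):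
--     # One contiguous-window pass per line instead of four strided slices + zip.
--     for tag, line in tagged_table:
--         fixations = []
--         for i in range(8, len(line), 4):
--             w = line[i:i + 4]
--             if len(w) == 4:
--                 x = int(w[0])
--                 y = int(w[1])
--                 start = int(w[2])
--                 end = int(w[3])
--                 fixations.append((x, y, end - start))
--         yield (tag, tuple(fixations))
-- ===== Notes on version B (the rewrite author's own statement) =====
-- stated objective: alternative
-- what changed: Replaces the four parallel strided slices (line[8::4]..line[11::4]) zipped together by a single row-major pass over contiguous windows line[i:i+4], emitting a fixation only for complete windows.
import Mathlib
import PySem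

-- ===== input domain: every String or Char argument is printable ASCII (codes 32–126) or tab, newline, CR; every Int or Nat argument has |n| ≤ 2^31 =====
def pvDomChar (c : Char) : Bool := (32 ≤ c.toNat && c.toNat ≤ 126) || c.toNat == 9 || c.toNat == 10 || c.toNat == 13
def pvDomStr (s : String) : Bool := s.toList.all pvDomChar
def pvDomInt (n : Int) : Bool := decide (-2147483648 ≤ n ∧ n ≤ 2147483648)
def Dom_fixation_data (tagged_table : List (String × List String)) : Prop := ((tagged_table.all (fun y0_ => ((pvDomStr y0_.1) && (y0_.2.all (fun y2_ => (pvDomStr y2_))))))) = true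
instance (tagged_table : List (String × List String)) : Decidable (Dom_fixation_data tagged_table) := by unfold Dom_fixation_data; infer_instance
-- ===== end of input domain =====

-- B replaces A's four strided slices + zip by one contiguous-window pass per line (alternative decomposition, same cost).


-- int(s); total form: Pre_ guarantees the parse succeeds (Python raises ValueError otherwise)
def pvInt (s : String) : Int := (PySem.Int.ofStr? s).getD 0

-- ===== PORT A =====
-- A's per-line body: four strided slices line[8::4] … line[11::4], int-mapped, zipped, (x, y, end-start)
def fixation_data_lineA (line : List String) : List (Int × Int × Int) :=
  let Xes := ((PySem.List.slice? line (some 8) none 4).getD []).map pvInt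
  let Ys := ((PySem.List.slice? line (some 9) none 4).getD []).map pvInt
  let fixation_starts := ((PySem.List.slice? line (some 10) none 4).getD []).map pvInt
  let fixation_ends := ((PySem.List.slice? line (some 11) none 4).getD []).map pvInt
  (((Xes.zip Ys).zip fixation_starts).zip fixation_ends).map
    (fun q => (q.1.1.1, q.1.1.2, q.2 - q.1.2))

def fixation_data (tagged_table : List (String × List String)) : List (String × (List (Int × Int × Int))) :=
  tagged_table.map (fun tagged_line => (tagged_line.1, fixation_data_lineA tagged_line.2))

-- ===== PORT B =====
-- B's per-line body: one pass over contiguous windows line[i:i+4], i = 8, 12, …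
def fixation_data_lineB (line : List String) : List (Int × Int × Int) :=
  (PySem.List.pyRange 8 (line.length : Int) 4).foldl
    (fun acc i =>
      let w := PySem.List.slice line (some i) (some (i + 4))
      if w.length = 4 then
        let x := pvInt (PySem.List.pyGetD w 0 "")
        let y := pvInt (PySem.List.pyGetD w 1 "")
        let start := pvInt (PySem.List.pyGetD w 2 "")
        let «end» := pvInt (PySem.List.pyGetD w 3 "")
        acc ++ [(x, y, «end» - start)]
      else acc) []

def fixation_data_alt (tagged_table : List (String × List String)) : List (String × (List (Int × Int × Int))) :=
  tagged_table.map (fun tagged_line => (tagged_line.1, fixation_data_lineB tagged_line.2))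

-- ===== PRECONDITION & SPEC =====
-- A int()-converts every element of line[8:] (zip pulls lazily, also from the incomplete trailing window),
-- raising ValueError on any non-integer token there; Pre_ excludes exactly those inputs.
def Pre_fixation_data (tagged_table : List (String × List String)) : Prop :=
  (tagged_table.all (fun p => (p.2.drop 8).all (fun s => (PySem.Int.ofStr? s).isSome))) = true
instance (tagged_table : List (String × List String)) : Decidable (Pre_fixation_data tagged_table) := by unfold Pre_fixation_data; infer_instance

def pvWitness_fixation_data : (List (String × List String)) :=
  [("cond1", ["a", "b", "c", "d", "e", "f", "g", "h", "10", "20", "5", "9", "11", "21", "12", "17", "7"])]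

def Spec_fixation_data (tagged_table : List (String × List String)) (out : List (String × (List (Int × Int × Int)))) : Prop := out = fixation_data_alt tagged_table
instance (tagged_table : List (String × List String)) (out : List (String × (List (Int × Int × Int)))) : Decidable (Spec_fixation_data tagged_table out) := by unfold Spec_fixation_data; infer_instance

-- ===== CLAIM (what is proved, stated in full; the proofs are below) =====
def Claim_equal_fixation_data : Prop := ∀ (tagged_table : List (String × List String)), Dom_fixation_data tagged_table → Pre_fixation_data tagged_table → Spec_fixation_data tagged_table (fixation_data tagged_table)
-- ===== LEMMAS AND PROOFS =====

-- the common normal form: window k of a line contributes (x, y, end - start) read at indices 8+4k … 11+4k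
def pvWin (line : List String) (k : Nat) : Int × Int × Int :=
  (pvInt (line.getD (8 + 4 * k) ""), pvInt (line.getD (9 + 4 * k) ""),
   pvInt (line.getD (11 + 4 * k) "") - pvInt (line.getD (10 + 4 * k) ""))

lemma filterMap_eq_map_of {α β : Type} (f : α → Option β) (g : α → β) (l : List α)
    (h : ∀ a ∈ l, f a = some (g a)) : l.filterMap f = l.map g := by
  induction l with
  | nil => rfl
  | cons a t ih => simp [h a (by simp), ih (fun x hx => h x (by simp [hx]))]

lemma strideA (line : List String) (j : Nat) :
    (PySem.List.slice? line (some (j : Int)) none 4).getD []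
      = (List.range ((line.length - j + 3) / 4)).map (fun k => line.getD (j + 4 * k) "") := by
  simp only [PySem.List.slice?, PySem.List.sliceIndices]
  norm_num
  rw [if_neg (by omega : ¬ ((j:Int) < 0))]
  by_cases hcase : line.length ≤ j
  · rw [min_eq_right (by exact_mod_cast hcase)]
    have h0 : (line.length - j + 3)/4 = 0 := by omega
    simp [h0]
  · rw [min_eq_left (by omega)]
    rw [if_pos (by omega)]
    have hc : (((line.length:Int) - j + 4 - 1)/4).toNat = (line.length - j + 3)/4 := by omega
    rw [hc]
    apply filterMap_eq_map_of
    intro k hk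
    simp only [List.mem_range] at hk
    have hidx : ((j:Int) + 4 * (k:Int)).toNat = j + 4 * k := by omega
    have hlt2 : j + 4 * k < line.length := by omega
    simp [hidx, List.getElem?_eq_getElem hlt2]

lemma fixation_lineA_eq (line : List String) :
    fixation_data_lineA line = (List.range ((line.length - 8) / 4)).map (pvWin line) := by
  unfold fixation_data_lineA
  have h8 := strideA line 8
  have h9 := strideA line 9
  have h10 := strideA line 10
  have h11 := strideA line 11
  norm_num at h8 h9 h10 h11
  rw [h8, h9, h10, h11]
  apply List.ext_getElem
  · simp only [List.length_map, List.length_zip, List.length_range]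
    omega
  · intro k h1 h2
    simp only [List.getElem_map, List.getElem_zip, List.getElem_range, pvWin]
    simp [List.getD_eq_getElem?_getD]

lemma window_eq (line : List String) (k : Nat) (h : 8 + 4 * k + 4 ≤ line.length) :
    PySem.List.slice line (some ((8 : Int) + 4 * k)) (some ((8 : Int) + 4 * k + 4))
      = [line.getD (8 + 4 * k) "", line.getD (9 + 4 * k) "", line.getD (10 + 4 * k) "", line.getD (11 + 4 * k) ""] := by
  rw [PySem.List.slice_toNat line (by omega) (by omega)]
  have h1 : ((8 : Int) + 4 * k).toNat = 8 + 4 * k := by omega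
  have h2 : ((8 : Int) + 4 * k + 4).toNat = 8 + 4 * k + 4 := by omega
  rw [h1, h2]
  have h3 : 8 + 4 * k + 4 - (8 + 4 * k) = 4 := by omega
  rw [h3]
  apply List.ext_getElem
  · simp; omega
  · intro i hi1 hi2
    simp at hi1 hi2
    simp only [List.getElem_take, List.getElem_drop]
    interval_cases i <;>
      simp only [List.getElem_cons_zero, List.getElem_cons_succ] <;>
      · rw [List.getD_eq_getElem _ _ (by omega)]
        first
        | rfl
        | (congr 1; omega)

lemma fixation_lineB_eq (line : List String) :
    fixation_data_lineB line = (List.range ((line.length - 8) / 4)).map (pvWin line) := by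
  unfold fixation_data_lineB
  have hbody : (fun (acc : List (Int × Int × Int)) (i : Int) =>
      let w := PySem.List.slice line (some i) (some (i + 4))
      if w.length = 4 then
        let x := pvInt (PySem.List.pyGetD w 0 "")
        let y := pvInt (PySem.List.pyGetD w 1 "")
        let start := pvInt (PySem.List.pyGetD w 2 "")
        let «end» := pvInt (PySem.List.pyGetD w 3 "")
        acc ++ [(x, y, «end» - start)]
      else acc)
    = (fun acc i => acc ++
        (let w := PySem.List.slice line (some i) (some (i + 4))
         if w.length = 4 then
           [(pvInt (PySem.List.pyGetD w 0 ""), pvInt (PySem.List.pyGetD w 1 ""),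
             pvInt (PySem.List.pyGetD w 3 "") - pvInt (PySem.List.pyGetD w 2 ""))]
         else [])) := by
    funext acc i
    by_cases hw : (PySem.List.slice line (some i) (some (i + 4))).length = 4 <;> simp [hw]
  rw [hbody, PySem.List.foldl_append_eq_flatMap]
  rw [PySem.List.pyRange_of_pos 8 (line.length : Int) (by norm_num), List.flatMap_map]
  set n := line.length with hn
  have hcnt : (if (8:Int) < (n:Int) then (((n:Int) - 8 + 4 - 1) / 4).toNat else 0)
      = (n - 8 + 3) / 4 := by
    split_ifs with h <;> omega
  rw [hcnt]
  set W := (n - 8) / 4 with hW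
  have hg : ∀ k ∈ List.range W,
      (let w := PySem.List.slice line (some ((8:Int) + 4 * k)) (some ((8:Int) + 4 * k + 4))
       if w.length = 4 then
         [(pvInt (PySem.List.pyGetD w 0 ""), pvInt (PySem.List.pyGetD w 1 ""),
           pvInt (PySem.List.pyGetD w 3 "") - pvInt (PySem.List.pyGetD w 2 ""))]
       else []) = [pvWin line k] := by
    intro k hk
    simp only [List.mem_range] at hk
    have hle : 8 + 4 * k + 4 ≤ n := by omega
    rw [window_eq line k hle]
    norm_num [PySem.List.pyGetD, PySem.List.pyIdx?, pvWin]
    rfl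
  rcases (by omega : (n - 8 + 3) / 4 = W ∨ (n - 8 + 3) / 4 = W + 1) with hc | hc
  · rw [hc, List.flatMap_congr hg,
        ← List.flatMap_map (pvWin line) (fun x => [x]) (List.range W), List.flatMap_singleton',
        List.nil_append]
  · rw [hc, List.range_succ, List.flatMap_append, List.flatMap_congr hg,
        ← List.flatMap_map (pvWin line) (fun x => [x]) (List.range W), List.flatMap_singleton']
    have hshort : (PySem.List.slice line (some ((8:Int) + 4 * W)) (some ((8:Int) + 4 * W + 4))).length ≠ 4 := by
      rw [PySem.List.slice_toNat line (by omega) (by omega)]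
      simp
      omega
    simp [hshort]


-- ===== VERDICT (by name: the statement is the Claim_ definition above) =====
theorem fixation_data_spec : Claim_equal_fixation_data := by
  intro tt _ _
  unfold Spec_fixation_data fixation_data fixation_data_alt
  simp [fixation_lineA_eq, fixation_lineB_eq]
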